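-- pv_equiv track=rewrite | github.com/nahcikeel/Algorithm | 프로그래머스/1/133499. 옹알이 （2）/옹알이 （2）.py | solution
-- ===== SOURCE A (Python) =====
-- def solution(babbling):
--     words = ["aya", "ye", "woo", "ma"]
--     answer = 0
--
--     for b in babbling:
--         prev = ""
--         temp = b
--
--         for w in words:
--             if w * 2 in temp:
--                 break
--             temp = temp.replace(w, " ")
--         else:
--             if temp.strip() == "":
--                 answer += 1
--
--     return answer
-- ===== SOURCE B (Python) =====
-- def solution(babbling):
--     words = ["aya", "ye", "woo", "ma"]
--
--     def ok(s, prev):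
--         if s == "":
--             return True
--         for w in words:
--             if s.startswith(w):
--                 return w != prev and ok(s[len(w):], w)
--         return False
--
--     return sum(1 for b in babbling if ok(b, ""))
-- ===== Notes on version B (the rewrite author's own statement) =====
-- stated objective: alternative
-- what changed: B decides each fragment by a direct recursive tokenizer (greedily consuming the unique word prefix and forbidding repetition of the previous word) instead of A's four-pass replace-with-space / doubled-substring / strip pipeline.
-- outside the precondition, e.g. on solution([' ']): A returns 1, B returns 0; on solution(['\t\tma']): A returns 1, B returns 0
import Mathlib
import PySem

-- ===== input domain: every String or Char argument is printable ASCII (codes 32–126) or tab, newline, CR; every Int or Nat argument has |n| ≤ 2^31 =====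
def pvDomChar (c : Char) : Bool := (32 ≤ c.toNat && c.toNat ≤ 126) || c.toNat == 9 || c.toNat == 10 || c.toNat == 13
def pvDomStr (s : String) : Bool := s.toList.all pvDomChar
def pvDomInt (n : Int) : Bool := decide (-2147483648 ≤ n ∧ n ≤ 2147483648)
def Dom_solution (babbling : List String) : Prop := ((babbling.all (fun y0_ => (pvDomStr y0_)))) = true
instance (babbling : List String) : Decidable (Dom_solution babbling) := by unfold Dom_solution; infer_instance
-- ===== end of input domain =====

-- B replaces A's four-pass replace/doubled-substring/strip pipeline by a direct recursive
-- tokenizer per fragment (alternative algorithm, same asymptotic cost).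


-- ===== PORT A =====
-- words = ["aya", "ye", "woo", "ma"]  (kept as lists of characters)
def pvWordsA : List (List Char) := [['a','y','a'], ['y','e'], ['w','o','o'], ['m','a']]

-- the inner `for w in words: … break … else:` loop; `none` means the loop broke,
-- `some temp` is the value of temp after a full pass (Python's for-else).
def pvLoopA : List (List Char) → List Char → Option (List Char)
  | [], temp => some temp
  | w :: ws, temp =>
    if PySem.Chars.isIn (PySem.List.pyRepeat w 2) temp then none
    else pvLoopA ws (PySem.Chars.replace temp w [' '])

def solution (babbling : List String) : Int :=
  babbling.foldl (fun answer b =>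
    match pvLoopA pvWordsA b.toList with
    | none => answer
    | some temp => if PySem.Chars.strip temp = [] then answer + 1 else answer) 0

-- ===== PORT B =====
-- ok(s, prev): the for-loop over the four concrete words, unrolled; each branch is
-- `if s.startswith(w): return w != prev and ok(s[len(w):], w)`.
def pvOk (s prev : List Char) : Bool :=
  match s with
  | [] => true
  | c :: t =>
    if PySem.Chars.startswith (c :: t) ['a','y','a'] then
      decide (['a','y','a'] ≠ prev) && pvOk (t.drop 2) ['a','y','a']
    else if PySem.Chars.startswith (c :: t) ['y','e'] then
      decide (['y','e'] ≠ prev) && pvOk (t.drop 1) ['y','e']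
    else if PySem.Chars.startswith (c :: t) ['w','o','o'] then
      decide (['w','o','o'] ≠ prev) && pvOk (t.drop 2) ['w','o','o']
    else if PySem.Chars.startswith (c :: t) ['m','a'] then
      decide (['m','a'] ≠ prev) && pvOk (t.drop 1) ['m','a']
    else false
termination_by s.length

def solution_alt (babbling : List String) : Int :=
  babbling.foldl (fun acc b => acc + (if pvOk b.toList [] then 1 else 0)) 0

-- ===== PRECONDITION & SPEC =====
-- the four words, used by the precondition below
def pvWordsPre : List (List Char) := [['a','y','a'], ['y','e'], ['w','o','o'], ['m','a']]

-- Pre_ excludes only fragments that contain whitespace AND whose every non-whitespace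
-- character is word-coverable within the fragment's character set: on those A's
-- replace-with-space/strip sentinel can count a fragment (e.g. " " or "aya ye") that is
-- not a concatenation of words, while B's tokenizer rejects it.  Fragments that are
-- whitespace-free, or that contain some non-whitespace character c0 such that every word
-- containing c0 also needs a character the fragment lacks, are kept (both reject there).
def Pre_solution (babbling : List String) : Prop :=
  (babbling.all (fun b =>
    b.toList.all (fun c => !PySem.Chars.isspace c)
    || b.toList.any (fun c0 => !PySem.Chars.isspace c0 &&
         pvWordsPre.all (fun w => !(w.contains c0) || w.any (fun ch => !(b.toList.contains ch)))))) = true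
instance (babbling : List String) : Decidable (Pre_solution babbling) := by
  unfold Pre_solution; infer_instance

def pvWitness_solution : List String := ["aya", "x"]

def Spec_solution (babbling : List String) (out : Int) : Prop := out = solution_alt babbling
instance (babbling : List String) (out : Int) : Decidable (Spec_solution babbling out) := by
  unfold Spec_solution; infer_instance

-- ===== CLAIM (what is proved, stated in full; the proofs are below) =====
def Claim_equal_solution : Prop := ∀ (babbling : List String), Dom_solution babbling → Pre_solution babbling → Spec_solution babbling (solution babbling)

-- ===== LEMMAS AND PROOFS =====

-- `s.replace(w, " ")` for a nonempty pattern, as a plain recursion (proof-side model).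
def rep1 (p : List Char) : List Char → List Char
  | [] => []
  | c :: t =>
    if p.isPrefixOf (c :: t) then ' ' :: rep1 p (t.drop (p.length - 1))
    else c :: rep1 p t
termination_by s => s.length

theorem rep1_nil (p : List Char) : rep1 p [] = [] := by simp [rep1]
theorem rep1_cons_pos (p : List Char) (c : Char) (t : List Char)
    (h : p.isPrefixOf (c :: t) = true) :
    rep1 p (c :: t) = ' ' :: rep1 p (t.drop (p.length - 1)) := by rw [rep1]; simp [h]
theorem rep1_cons_neg (p : List Char) (c : Char) (t : List Char)
    (h : p.isPrefixOf (c :: t) = false) :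
    rep1 p (c :: t) = c :: rep1 p t := by rw [rep1]; simp [h]
theorem rep1_append_self (c : Char) (p' x : List Char) :
    rep1 (c :: p') (c :: (p' ++ x)) = ' ' :: rep1 (c :: p') x := by
  rw [rep1_cons_pos]
  · simp
  · simp [List.isPrefixOf_iff_prefix]

-- replace bridge
theorem go_eq_rep1 (p : List Char) (hp : p ≠ []) :
    ∀ (fuel : Nat) (l acc : List Char), l.length ≤ fuel →
      PySem.Chars.replace.go p [' '] fuel l acc = acc.reverse ++ rep1 p l := by
  intro fuel
  induction fuel with
  | zero =>
    intro l acc h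
    have : l = [] := by cases l <;> simp_all
    subst this
    rw [PySem.Chars.replace.go.eq_def]; simp [rep1_nil]
  | succ n ih =>
    intro l acc h
    cases l with
    | nil => rw [PySem.Chars.replace.go.eq_def]; simp [rep1_nil]
    | cons c t =>
      rw [PySem.Chars.replace.go.eq_def]
      by_cases hpre : p.isPrefixOf (c :: t) = true
      · simp only [hpre, if_true]
        rw [ih]
        · rw [rep1_cons_pos _ _ _ hpre]
          have hplen : 1 ≤ p.length := by cases p <;> simp_all
          have : List.drop p.length (c :: t) = List.drop (p.length - 1) t := by
            cases p with
            | nil => simp_all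
            | cons a p' => simp
          rw [this]; simp
        · have hplen : 1 ≤ p.length := by cases p <;> simp_all
          simp only [List.length_drop, List.length_cons] at *
          omega
      · simp only [hpre]; simp
        rw [ih]
        · rw [rep1_cons_neg _ _ _ (by rw [Bool.eq_false_iff]; exact hpre)]; simp
        · simp at h; omega

theorem replace_eq_rep1 (s p : List Char) (hp : p ≠ []) :
    PySem.Chars.replace s p [' '] = rep1 p s := by
  unfold PySem.Chars.replace
  have : p.isEmpty = false := by cases p <;> simp_all
  simp only [this, if_false, Bool.false_eq_true]
  exact go_eq_rep1 p hp s.length s [] le_rfl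

-- isIn lemmas
theorem in_nil (p : List Char) (hp : p ≠ []) : PySem.Chars.isIn p [] = false := by
  rw [PySem.Chars.isIn_eq_false_iff]
  intro h
  exact hp (List.eq_nil_of_infix_nil h)

theorem in_cons (p : List Char) (c : Char) (x : List Char) :
    PySem.Chars.isIn p (c :: x) = (p.isPrefixOf (c :: x) || PySem.Chars.isIn p x) := by
  rw [Bool.eq_iff_iff]
  simp [PySem.Chars.isIn_iff_infix, List.infix_cons_iff, List.isPrefixOf_iff_prefix]

-- strip lemmas
theorem strip_nil : PySem.Chars.strip [] = [] := by decide

theorem strip_cons_space (x : List Char) :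
    PySem.Chars.strip (' ' :: x) = PySem.Chars.strip x := by
  unfold PySem.Chars.strip PySem.Chars.lstrip
  rw [List.dropWhile_cons_of_pos (by decide)]

theorem strip_eq_nil_iff (l : List Char) :
    PySem.Chars.strip l = [] ↔ ∀ c ∈ l, PySem.Chars.isspace c = true := by
  unfold PySem.Chars.strip PySem.Chars.rstrip PySem.Chars.lstrip
  rw [List.reverse_eq_nil_iff, List.dropWhile_eq_nil_iff]
  constructor
  · intro h c hc
    by_cases hsp : PySem.Chars.isspace c = true
    · exact hsp
    · exfalso
      have hmem : c ∈ List.dropWhile PySem.Chars.isspace l := by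
        by_contra hnm
        have := List.takeWhile_append_dropWhile (p := PySem.Chars.isspace) (l := l)
        have hc' : c ∈ List.takeWhile PySem.Chars.isspace l := by
          rw [← this] at hc
          rcases List.mem_append.mp hc with h1 | h2
          · exact h1
          · exact absurd h2 hnm
        exact hsp (List.mem_takeWhile_imp hc')
      exact hsp (h c (by simpa using hmem))
  · intro h c hc
    exact h c ((List.dropWhile_sublist _).mem (by simpa using hc))

theorem pfx_cons_false (a : Char) (p' : List Char) (c : Char) (t : List Char) (h : a ≠ c) :
    (a :: p').isPrefixOf (c :: t) = false := by
  rw [Bool.eq_false_iff, Ne, List.isPrefixOf_iff_prefix, List.cons_prefix_cons]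
  tauto

theorem rep1_cons_ne (a : Char) (p' : List Char) (c : Char) (t : List Char) (h : a ≠ c) :
    rep1 (a :: p') (c :: t) = c :: rep1 (a :: p') t :=
  rep1_cons_neg _ _ _ (pfx_cons_false a p' c t h)

theorem rep1_cons_shape (a : Char) (p' : List Char) (c : Char) (t : List Char) :
    ∃ r, (rep1 (a :: p') (c :: t) = ' ' :: r ∧ a = c) ∨ rep1 (a :: p') (c :: t) = c :: r := by
  by_cases h : (a :: p').isPrefixOf (c :: t) = true
  · refine ⟨_, Or.inl ⟨rep1_cons_pos _ _ _ h, ?_⟩⟩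
    have := (List.isPrefixOf_iff_prefix).mp h
    exact (List.cons_prefix_cons.mp this).1
  · exact ⟨_, Or.inr (rep1_cons_neg _ _ _ (by rw [Bool.eq_false_iff]; exact h))⟩

abbrev pvA : List Char := ['a','y','a']
abbrev pvY : List Char := ['y','e']
abbrev pvW : List Char := ['w','o','o']
abbrev pvM : List Char := ['m','a']

abbrev g1 (s : List Char) : List Char := rep1 pvA s
abbrev g2 (s : List Char) : List Char := rep1 pvY (g1 s)
abbrev g3 (s : List Char) : List Char := rep1 pvW (g2 s)
abbrev g4 (s : List Char) : List Char := rep1 pvM (g3 s)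

-- two-layer chain shape with the matched-head information
theorem chain2_shape (d : Char) (t : List Char) :
    ∃ r, (rep1 pvY (g1 (d :: t)) = ' ' :: r ∧ (d = 'a' ∨ d = 'y')) ∨
         rep1 pvY (g1 (d :: t)) = d :: r := by
  obtain ⟨r, h | h⟩ := rep1_cons_shape 'a' ['y','a'] d t
  · obtain ⟨h1, h2⟩ := h
    refine ⟨rep1 pvY r, Or.inl ⟨?_, Or.inl h2.symm⟩⟩
    rw [show g1 (d :: t) = ' ' :: r from h1]
    exact rep1_cons_ne 'y' ['e'] ' ' r (by decide)
  · rw [show g1 (d :: t) = d :: r from h]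
    obtain ⟨r2, h' | h'⟩ := rep1_cons_shape 'y' ['e'] d r
    · exact ⟨r2, Or.inl ⟨h'.1, Or.inr h'.2.symm⟩⟩
    · exact ⟨r2, Or.inr h'⟩

theorem chain3_shape (d : Char) (t : List Char) :
    ∃ r, (rep1 pvW (rep1 pvY (g1 (d :: t))) = ' ' :: r ∧ (d = 'a' ∨ d = 'y' ∨ d = 'w')) ∨
         rep1 pvW (rep1 pvY (g1 (d :: t))) = d :: r := by
  obtain ⟨r, h | h⟩ := chain2_shape d t
  · obtain ⟨h1, h2⟩ := h
    refine ⟨rep1 pvW r, Or.inl ⟨?_, by tauto⟩⟩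
    rw [h1]
    exact rep1_cons_ne 'w' ['o','o'] ' ' r (by decide)
  · rw [h]
    obtain ⟨r2, h' | h'⟩ := rep1_cons_shape 'w' ['o','o'] d r
    · exact ⟨r2, Or.inl ⟨h'.1, by tauto⟩⟩
    · exact ⟨r2, Or.inr h'⟩

theorem pfx_e_g1 : ∀ t : List Char, (['e'] : List Char).isPrefixOf (g1 t) = (['e'] : List Char).isPrefixOf t := by
  intro t
  cases t with
  | nil => simp [g1, rep1_nil]
  | cons d t2 =>
    obtain ⟨r, ⟨h1, h2⟩ | h⟩ := rep1_cons_shape 'a' ['y','a'] d t2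
    · show (['e'] : List Char).isPrefixOf (rep1 pvA (d :: t2)) = _
      rw [show rep1 pvA (d :: t2) = ' ' :: r from h1, ← h2]
      simp [List.isPrefixOf]
    · show (['e'] : List Char).isPrefixOf (rep1 pvA (d :: t2)) = _
      rw [show rep1 pvA (d :: t2) = d :: r from h]
      simp [List.isPrefixOf]

theorem EQ2 : ∀ u : List Char, pvY.isPrefixOf (g1 u) = pvY.isPrefixOf u := by
  intro u
  cases u with
  | nil => simp [g1, rep1_nil]
  | cons c t =>
    by_cases hc : c = 'y'
    · subst hc
      have hg : g1 ('y' :: t) = 'y' :: g1 t := rep1_cons_ne 'a' ['y','a'] 'y' t (by decide)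
      rw [hg]
      show (['y','e'] : List Char).isPrefixOf _ = (['y','e'] : List Char).isPrefixOf _
      simp [List.isPrefixOf, pfx_e_g1 t]
    · obtain ⟨r, ⟨h1, h2⟩ | h⟩ := rep1_cons_shape 'a' ['y','a'] c t
      · rw [show g1 (c :: t) = ' ' :: r from h1]
        rw [pfx_cons_false 'y' ['e'] ' ' r (by decide), pfx_cons_false 'y' ['e'] c t (fun e => hc e.symm)]
      · rw [show g1 (c :: t) = c :: r from h]
        rw [pfx_cons_false 'y' ['e'] c r (fun e => hc e.symm), pfx_cons_false 'y' ['e'] c t (fun e => hc e.symm)]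

theorem pfx_o_chain2 : ∀ t : List Char, (['o'] : List Char).isPrefixOf (rep1 pvY (g1 t)) = (['o'] : List Char).isPrefixOf t := by
  intro t
  cases t with
  | nil => simp [g1, rep1_nil]
  | cons d t2 =>
    obtain ⟨r, ⟨h1, h2⟩ | h⟩ := chain2_shape d t2
    · rw [h1]
      rcases h2 with h2 | h2 <;> subst h2 <;> simp [List.isPrefixOf]
    · rw [h]
      simp [List.isPrefixOf]

theorem pfx_oo_chain2 : ∀ t : List Char, (['o','o'] : List Char).isPrefixOf (rep1 pvY (g1 t)) = (['o','o'] : List Char).isPrefixOf t := by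
  intro t
  cases t with
  | nil => simp [g1, rep1_nil]
  | cons d t2 =>
    by_cases hd : d = 'o'
    · subst hd
      have hg : g1 ('o' :: t2) = 'o' :: g1 t2 := rep1_cons_ne 'a' ['y','a'] 'o' t2 (by decide)
      rw [show rep1 pvY (g1 ('o' :: t2)) = 'o' :: rep1 pvY (g1 t2) by
        rw [hg]; exact rep1_cons_ne 'y' ['e'] 'o' (g1 t2) (by decide)]
      simp [List.isPrefixOf, pfx_o_chain2 t2]
    · obtain ⟨r, ⟨h1, h2⟩ | h⟩ := chain2_shape d t2
      · rw [h1]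
        rw [pfx_cons_false 'o' ['o'] ' ' r (by decide), pfx_cons_false 'o' ['o'] d t2 (fun e => hd e.symm)]
      · rw [h]
        rw [pfx_cons_false 'o' ['o'] d r (fun e => hd e.symm), pfx_cons_false 'o' ['o'] d t2 (fun e => hd e.symm)]

theorem EQ3 : ∀ u : List Char, pvW.isPrefixOf (g2 u) = pvW.isPrefixOf u := by
  intro u
  cases u with
  | nil => simp [g2, g1, rep1_nil]
  | cons c t =>
    by_cases hc : c = 'w'
    · subst hc
      have hg : g1 ('w' :: t) = 'w' :: g1 t := rep1_cons_ne 'a' ['y','a'] 'w' t (by decide)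
      have hg2 : g2 ('w' :: t) = 'w' :: rep1 pvY (g1 t) := by
        show rep1 pvY (g1 ('w' :: t)) = _
        rw [hg]; exact rep1_cons_ne 'y' ['e'] 'w' (g1 t) (by decide)
      rw [hg2]
      show (['w','o','o'] : List Char).isPrefixOf _ = (['w','o','o'] : List Char).isPrefixOf _
      have := pfx_oo_chain2 t
      simp only [List.isPrefixOf] at this ⊢
      simp [this]
    · obtain ⟨r, ⟨h1, h2⟩ | h⟩ := chain2_shape c t
      · rw [show g2 (c :: t) = ' ' :: r from h1]
        rw [pfx_cons_false 'w' ['o','o'] ' ' r (by decide), pfx_cons_false 'w' ['o','o'] c t (fun e => hc e.symm)]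
      · rw [show g2 (c :: t) = c :: r from h]
        rw [pfx_cons_false 'w' ['o','o'] c r (fun e => hc e.symm), pfx_cons_false 'w' ['o','o'] c t (fun e => hc e.symm)]

theorem pfx_a_chain3 : ∀ t : List Char, (['a'] : List Char).isPrefixOf (rep1 pvW (rep1 pvY (g1 t))) = true → (['a'] : List Char).isPrefixOf t = true := by
  intro t h
  cases t with
  | nil => simp [g1, rep1_nil] at h
  | cons d t2 =>
    obtain ⟨r, ⟨h1, h2⟩ | hh⟩ := chain3_shape d t2
    · rw [h1] at h
      simp [List.isPrefixOf] at h
    · rw [hh] at h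
      simp [List.isPrefixOf] at h ⊢
      tauto

theorem T4 : ∀ u : List Char, pvM.isPrefixOf (g3 u) = true → pvM.isPrefixOf u = true := by
  intro u h
  cases u with
  | nil => simp [g3, g2, g1, rep1_nil, pvM] at h
  | cons c t =>
    by_cases hc : c = 'm'
    · subst hc
      have hg3 : g3 ('m' :: t) = 'm' :: rep1 pvW (rep1 pvY (g1 t)) := by
        show rep1 pvW (rep1 pvY (rep1 pvA ('m' :: t))) = _
        rw [rep1_cons_ne 'a' ['y','a'] 'm' t (by decide),
            rep1_cons_ne 'y' ['e'] 'm' (rep1 ['a','y','a'] t) (by decide),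
            rep1_cons_ne 'w' ['o','o'] 'm' (rep1 ['y','e'] (rep1 ['a','y','a'] t)) (by decide)]
      rw [hg3] at h
      have h' : (['a'] : List Char) <+: rep1 pvW (rep1 pvY (g1 t)) :=
        (List.cons_prefix_cons.mp ((List.isPrefixOf_iff_prefix).mp h)).2
      have ha := pfx_a_chain3 t ((List.isPrefixOf_iff_prefix).mpr h')
      rw [List.isPrefixOf_iff_prefix] at ha ⊢
      exact List.cons_prefix_cons.mpr ⟨rfl, ha⟩
    · exfalso
      obtain ⟨r, ⟨h1, h2⟩ | hh⟩ := chain3_shape c t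
      · rw [show g3 (c :: t) = ' ' :: r from h1] at h
        simp [List.isPrefixOf] at h
      · rw [show g3 (c :: t) = c :: r from hh] at h
        rw [pfx_cons_false 'm' ['a'] c r (fun e => hc e.symm)] at h
        simp at h

theorem prev_ok (w : List Char) (hw : w = pvA ∨ w = pvY ∨ w = pvW ∨ w = pvM) (r : List Char) :
    pvOk r w = ((!(w.isPrefixOf r)) && pvOk r []) := by
  cases r with
  | nil =>
    rcases hw with h|h|h|h <;> subst h <;> simp [pvOk, List.isPrefixOf]
  | cons c t =>
    simp only [pvOk, PySem.Chars.startswith]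
    by_cases e1 : (['a','y','a'] : List Char).isPrefixOf (c :: t) = true
    · have hc : 'a' = c := (List.cons_prefix_cons.mp ((List.isPrefixOf_iff_prefix).mp e1)).1
      subst hc
      rcases hw with h|h|h|h <;> subst h <;> simp_all [pvA, pvY, pvW, pvM, List.isPrefixOf]
    · rw [Bool.not_eq_true] at e1
      by_cases e2 : (['y','e'] : List Char).isPrefixOf (c :: t) = true
      · have hc : 'y' = c := (List.cons_prefix_cons.mp ((List.isPrefixOf_iff_prefix).mp e2)).1
        subst hc
        rcases hw with h|h|h|h <;> subst h <;> simp_all [pvA, pvY, pvW, pvM, List.isPrefixOf]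
      · rw [Bool.not_eq_true] at e2
        by_cases e3 : (['w','o','o'] : List Char).isPrefixOf (c :: t) = true
        · have hc : 'w' = c := (List.cons_prefix_cons.mp ((List.isPrefixOf_iff_prefix).mp e3)).1
          subst hc
          rcases hw with h|h|h|h <;> subst h <;> simp_all [pvA, pvY, pvW, pvM, List.isPrefixOf]
        · rw [Bool.not_eq_true] at e3
          by_cases e4 : (['m','a'] : List Char).isPrefixOf (c :: t) = true
          · have hc : 'm' = c := (List.cons_prefix_cons.mp ((List.isPrefixOf_iff_prefix).mp e4)).1
            subst hc
            rcases hw with h|h|h|h <;> subst h <;> simp_all [pvA, pvY, pvW, pvM, List.isPrefixOf]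
          · rw [Bool.not_eq_true] at e4
            simp [e1, e2, e3, e4]

theorem in_cons_ne (a : Char) (p' : List Char) (c : Char) (x : List Char) (h : a ≠ c) :
    PySem.Chars.isIn (a :: p') (c :: x) = PySem.Chars.isIn (a :: p') x := by
  rw [in_cons, pfx_cons_false a p' c x h]; simp

theorem strip_cons_ne (c : Char) (x : List Char) (hc : PySem.Chars.isspace c = false) :
    (PySem.Chars.strip (c :: x) = []) = False := by
  simp only [eq_iff_iff, iff_false]
  intro h
  have := (strip_eq_nil_iff _).mp h c (List.mem_cons_self)
  rw [hc] at this; exact absurd this (by simp)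

theorem pfx_longer (r : List Char) (h : (['y','a'] : List Char).isPrefixOf r = false) :
    (['y','a','a','y','a'] : List Char).isPrefixOf r = false := by
  cases r with
  | nil => simp [List.isPrefixOf]
  | cons c t =>
    cases t with
    | nil => simp [List.isPrefixOf]
    | cons d t2 =>
      simp [List.isPrefixOf] at h ⊢
      tauto

-- flat (break-free) form of A's per-fragment test
def pvValid (s : List Char) : Bool :=
  !(PySem.Chars.isIn ['a','y','a','a','y','a'] s) &&
  (!(PySem.Chars.isIn ['y','e','y','e'] (g1 s)) &&
  (!(PySem.Chars.isIn ['w','o','o','w','o','o'] (g2 s)) &&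
  (!(PySem.Chars.isIn ['m','a','m','a'] (g3 s)) &&
  decide (PySem.Chars.strip (g4 s) = []))))

theorem pvValid_nil : pvValid [] = true := by
  have i1 : PySem.Chars.isIn ['a','y','a','a','y','a'] [] = false := in_nil _ (by decide)
  have i2 : PySem.Chars.isIn ['y','e','y','e'] [] = false := in_nil _ (by decide)
  have i3 : PySem.Chars.isIn ['w','o','o','w','o','o'] [] = false := in_nil _ (by decide)
  have i4 : PySem.Chars.isIn ['m','a','m','a'] [] = false := in_nil _ (by decide)
  simp [pvValid, g1, g2, g3, g4, rep1_nil, i1, i2, i3, i4, strip_nil]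

theorem pvMain : ∀ (n : Nat) (s : List Char), s.length ≤ n →
    (∀ c ∈ s, PySem.Chars.isspace c = false) → pvValid s = pvOk s [] := by
  intro n
  induction n with
  | zero =>
    intro s hl _
    have hs : s = [] := by cases s <;> simp_all
    subst hs
    rw [pvValid_nil, pvOk]
  | succ n ih =>
    intro s hl hws
    cases s with
    | nil => rw [pvValid_nil, pvOk]
    | cons c t =>
      by_cases e1 : (['a','y','a'] : List Char).isPrefixOf (c :: t) = true
      · -- s = "aya" ++ r
        obtain ⟨r, hr⟩ := (List.isPrefixOf_iff_prefix).mp e1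
        rw [show (['a','y','a'] : List Char) ++ r = 'a'::'y'::'a'::r from rfl] at hr
        cases hr
        have hwr : ∀ c ∈ r, PySem.Chars.isspace c = false := fun c hc => hws c (by simp [hc])
        have hlr : r.length ≤ n := by simp at hl; omega
        have hR : pvOk ('a'::'y'::'a'::r) [] = ((!((['a','y','a'] : List Char).isPrefixOf r)) && pvOk r []) := by
          rw [show pvOk ('a'::'y'::'a'::r) [] = pvOk r ['a','y','a'] from by
            simp [pvOk, PySem.Chars.startswith, List.isPrefixOf]]
          exact prev_ok _ (Or.inl rfl) r
        by_cases hA : (['a','y','a'] : List Char).isPrefixOf r = true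
        · -- "ayaaya" is a prefix of s : A breaks, B rejects the repeated word
          obtain ⟨r', hr'⟩ := (List.isPrefixOf_iff_prefix).mp hA
          rw [show (['a','y','a'] : List Char) ++ r' = 'a'::'y'::'a'::r' from rfl] at hr'
          cases hr'
          have hd : PySem.Chars.isIn ['a','y','a','a','y','a'] ('a'::'y'::'a'::'a'::'y'::'a'::r') = true := by
            rw [in_cons]
            simp [List.isPrefixOf]
          rw [hR]
          simp [pvValid, hd, List.isPrefixOf]
        · rw [Bool.not_eq_true] at hA
          by_cases hYA : (['y','a','a','y','a'] : List Char).isPrefixOf r = true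
          · -- "ayaaya" occurs at index 2 of s; B gets stuck on r = "ya…"
            obtain ⟨r', hr'⟩ := (List.isPrefixOf_iff_prefix).mp hYA
            rw [show (['y','a','a','y','a'] : List Char) ++ r' = 'y'::'a'::'a'::'y'::'a'::r' from rfl] at hr'
            cases hr'
            have hd : PySem.Chars.isIn ['a','y','a','a','y','a'] ('a'::'y'::'a'::'y'::'a'::'a'::'y'::'a'::r') = true := by
              rw [in_cons, in_cons, in_cons]
              simp [List.isPrefixOf]
            rw [hR]
            have hOkr : pvOk ('y'::'a'::'a'::'y'::'a'::r') [] = false := by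
              simp [pvOk, PySem.Chars.startswith, List.isPrefixOf]
            rw [hOkr]
            simp [pvValid, hd]
          · rw [Bool.not_eq_true] at hYA
            -- clean case: strip one "aya" token off both programs
            have hg1 : g1 ('a'::'y'::'a'::r) = ' ' :: g1 r := rep1_append_self 'a' ['y','a'] r
            have d1e : PySem.Chars.isIn ['a','y','a','a','y','a'] ('a'::'y'::'a'::r)
                     = PySem.Chars.isIn ['a','y','a','a','y','a'] r := by
              rw [in_cons, in_cons, in_cons]
              simp [List.isPrefixOf, hA, hYA]
            have hg2 : g2 ('a'::'y'::'a'::r) = ' ' :: g2 r := by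
              show rep1 pvY (g1 ('a'::'y'::'a'::r)) = _
              rw [hg1]; exact rep1_cons_ne 'y' ['e'] ' ' _ (by decide)
            have d2e : PySem.Chars.isIn ['y','e','y','e'] (g1 ('a'::'y'::'a'::r))
                     = PySem.Chars.isIn ['y','e','y','e'] (g1 r) := by
              rw [hg1, in_cons_ne 'y' _ ' ' _ (by decide)]
            have hg3 : g3 ('a'::'y'::'a'::r) = ' ' :: g3 r := by
              show rep1 pvW (g2 ('a'::'y'::'a'::r)) = _
              rw [hg2]; exact rep1_cons_ne 'w' ['o','o'] ' ' _ (by decide)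
            have d3e : PySem.Chars.isIn ['w','o','o','w','o','o'] (g2 ('a'::'y'::'a'::r))
                     = PySem.Chars.isIn ['w','o','o','w','o','o'] (g2 r) := by
              rw [hg2, in_cons_ne 'w' _ ' ' _ (by decide)]
            have hg4 : g4 ('a'::'y'::'a'::r) = ' ' :: g4 r := by
              show rep1 pvM (g3 ('a'::'y'::'a'::r)) = _
              rw [hg3]; exact rep1_cons_ne 'm' ['a'] ' ' _ (by decide)
            have d4e : PySem.Chars.isIn ['m','a','m','a'] (g3 ('a'::'y'::'a'::r))
                     = PySem.Chars.isIn ['m','a','m','a'] (g3 r) := by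
              rw [hg3, in_cons_ne 'm' _ ' ' _ (by decide)]
            have hv : pvValid ('a'::'y'::'a'::r) = pvValid r := by
              simp only [pvValid, d1e, d2e, d3e, d4e, hg4, strip_cons_space]
            rw [hv, ih r hlr hwr, hR, hA]
            simp
      · by_cases e2 : (['y','e'] : List Char).isPrefixOf (c :: t) = true
        · -- s = "ye" ++ r
          obtain ⟨r, hr⟩ := (List.isPrefixOf_iff_prefix).mp e2
          rw [show (['y','e'] : List Char) ++ r = 'y'::'e'::r from rfl] at hr
          cases hr
          have hwr : ∀ c ∈ r, PySem.Chars.isspace c = false := fun c hc => hws c (by simp [hc])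
          have hlr : r.length ≤ n := by simp at hl; omega
          have hR : pvOk ('y'::'e'::r) [] = ((!((['y','e'] : List Char).isPrefixOf r)) && pvOk r []) := by
            rw [show pvOk ('y'::'e'::r) [] = pvOk r ['y','e'] from by
              simp [pvOk, PySem.Chars.startswith, List.isPrefixOf]]
            exact prev_ok _ (Or.inr (Or.inl rfl)) r
          have hg1 : g1 ('y'::'e'::r) = 'y'::'e'::g1 r := by
            show rep1 pvA _ = _
            rw [rep1_cons_ne 'a' ['y','a'] 'y' _ (by decide), rep1_cons_ne 'a' ['y','a'] 'e' _ (by decide)]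
          have d1e : PySem.Chars.isIn ['a','y','a','a','y','a'] ('y'::'e'::r)
                   = PySem.Chars.isIn ['a','y','a','a','y','a'] r := by
            rw [in_cons_ne 'a' _ 'y' _ (by decide), in_cons_ne 'a' _ 'e' _ (by decide)]
          have eY : (['y','e'] : List Char).isPrefixOf (g1 r) = (['y','e'] : List Char).isPrefixOf r := EQ2 r
          by_cases hY : (['y','e'] : List Char).isPrefixOf r = true
          · have hd : PySem.Chars.isIn ['y','e','y','e'] (g1 ('y'::'e'::r)) = true := by
              rw [hg1, in_cons]
              simp [List.isPrefixOf, eY.trans hY]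
            rw [hR, hY]
            simp [pvValid, d1e, hd]
          · rw [Bool.not_eq_true] at hY
            have d2e : PySem.Chars.isIn ['y','e','y','e'] (g1 ('y'::'e'::r))
                     = PySem.Chars.isIn ['y','e','y','e'] (g1 r) := by
              rw [hg1, in_cons, in_cons_ne 'y' _ 'e' _ (by decide)]
              simp [List.isPrefixOf, eY.trans hY]
            have hg2 : g2 ('y'::'e'::r) = ' ' :: g2 r := by
              show rep1 pvY (g1 ('y'::'e'::r)) = _
              rw [hg1, rep1_cons_pos pvY 'y' ('e'::g1 r) (by simp [List.isPrefixOf])]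
              simp
            have hg3 : g3 ('y'::'e'::r) = ' ' :: g3 r := by
              show rep1 pvW (g2 ('y'::'e'::r)) = _
              rw [hg2]; exact rep1_cons_ne 'w' ['o','o'] ' ' _ (by decide)
            have d3e : PySem.Chars.isIn ['w','o','o','w','o','o'] (g2 ('y'::'e'::r))
                     = PySem.Chars.isIn ['w','o','o','w','o','o'] (g2 r) := by
              rw [hg2, in_cons_ne 'w' _ ' ' _ (by decide)]
            have hg4 : g4 ('y'::'e'::r) = ' ' :: g4 r := by
              show rep1 pvM (g3 ('y'::'e'::r)) = _
              rw [hg3]; exact rep1_cons_ne 'm' ['a'] ' ' _ (by decide)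
            have d4e : PySem.Chars.isIn ['m','a','m','a'] (g3 ('y'::'e'::r))
                     = PySem.Chars.isIn ['m','a','m','a'] (g3 r) := by
              rw [hg3, in_cons_ne 'm' _ ' ' _ (by decide)]
            have hv : pvValid ('y'::'e'::r) = pvValid r := by
              simp only [pvValid, d1e, d2e, d3e, d4e, hg4, strip_cons_space]
            rw [hv, ih r hlr hwr, hR, hY]
            simp
        · by_cases e3 : (['w','o','o'] : List Char).isPrefixOf (c :: t) = true
          · -- s = "woo" ++ r
            obtain ⟨r, hr⟩ := (List.isPrefixOf_iff_prefix).mp e3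
            rw [show (['w','o','o'] : List Char) ++ r = 'w'::'o'::'o'::r from rfl] at hr
            cases hr
            have hwr : ∀ c ∈ r, PySem.Chars.isspace c = false := fun c hc => hws c (by simp [hc])
            have hlr : r.length ≤ n := by simp at hl; omega
            have hR : pvOk ('w'::'o'::'o'::r) [] = ((!((['w','o','o'] : List Char).isPrefixOf r)) && pvOk r []) := by
              rw [show pvOk ('w'::'o'::'o'::r) [] = pvOk r ['w','o','o'] from by
                simp [pvOk, PySem.Chars.startswith, List.isPrefixOf]]
              exact prev_ok _ (Or.inr (Or.inr (Or.inl rfl))) r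
            have hg1 : g1 ('w'::'o'::'o'::r) = 'w'::'o'::'o'::g1 r := by
              show rep1 pvA _ = _
              rw [rep1_cons_ne 'a' ['y','a'] 'w' _ (by decide), rep1_cons_ne 'a' ['y','a'] 'o' _ (by decide),
                  rep1_cons_ne 'a' ['y','a'] 'o' _ (by decide)]
            have d1e : PySem.Chars.isIn ['a','y','a','a','y','a'] ('w'::'o'::'o'::r)
                     = PySem.Chars.isIn ['a','y','a','a','y','a'] r := by
              rw [in_cons_ne 'a' _ 'w' _ (by decide), in_cons_ne 'a' _ 'o' _ (by decide),
                  in_cons_ne 'a' _ 'o' _ (by decide)]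
            have hg2 : g2 ('w'::'o'::'o'::r) = 'w'::'o'::'o'::g2 r := by
              show rep1 pvY (g1 ('w'::'o'::'o'::r)) = _
              rw [hg1, rep1_cons_ne 'y' ['e'] 'w' _ (by decide), rep1_cons_ne 'y' ['e'] 'o' _ (by decide),
                  rep1_cons_ne 'y' ['e'] 'o' _ (by decide)]
            have d2e : PySem.Chars.isIn ['y','e','y','e'] (g1 ('w'::'o'::'o'::r))
                     = PySem.Chars.isIn ['y','e','y','e'] (g1 r) := by
              rw [hg1, in_cons_ne 'y' _ 'w' _ (by decide), in_cons_ne 'y' _ 'o' _ (by decide),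
                  in_cons_ne 'y' _ 'o' _ (by decide)]
            have eW : (['w','o','o'] : List Char).isPrefixOf (g2 r) = (['w','o','o'] : List Char).isPrefixOf r := EQ3 r
            by_cases hW : (['w','o','o'] : List Char).isPrefixOf r = true
            · have hd : PySem.Chars.isIn ['w','o','o','w','o','o'] (g2 ('w'::'o'::'o'::r)) = true := by
                rw [hg2, in_cons]
                simp [List.isPrefixOf, eW.trans hW]
              rw [hR, hW]
              simp [pvValid, d1e, d2e, hd]
            · rw [Bool.not_eq_true] at hW
              have d3e : PySem.Chars.isIn ['w','o','o','w','o','o'] (g2 ('w'::'o'::'o'::r))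
                       = PySem.Chars.isIn ['w','o','o','w','o','o'] (g2 r) := by
                rw [hg2, in_cons, in_cons_ne 'w' _ 'o' _ (by decide), in_cons_ne 'w' _ 'o' _ (by decide)]
                simp [List.isPrefixOf, eW.trans hW]
              have hg3 : g3 ('w'::'o'::'o'::r) = ' ' :: g3 r := by
                show rep1 pvW (g2 ('w'::'o'::'o'::r)) = _
                rw [hg2, rep1_cons_pos pvW 'w' ('o'::'o'::g2 r) (by simp [List.isPrefixOf])]
                simp
              have hg4 : g4 ('w'::'o'::'o'::r) = ' ' :: g4 r := by
                show rep1 pvM (g3 ('w'::'o'::'o'::r)) = _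
                rw [hg3]; exact rep1_cons_ne 'm' ['a'] ' ' _ (by decide)
              have d4e : PySem.Chars.isIn ['m','a','m','a'] (g3 ('w'::'o'::'o'::r))
                       = PySem.Chars.isIn ['m','a','m','a'] (g3 r) := by
                rw [hg3, in_cons_ne 'm' _ ' ' _ (by decide)]
              have hv : pvValid ('w'::'o'::'o'::r) = pvValid r := by
                simp only [pvValid, d1e, d2e, d3e, d4e, hg4, strip_cons_space]
              rw [hv, ih r hlr hwr, hR, hW]
              simp
          · by_cases e4 : (['m','a'] : List Char).isPrefixOf (c :: t) = true
            · -- s = "ma" ++ r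
              obtain ⟨r, hr⟩ := (List.isPrefixOf_iff_prefix).mp e4
              rw [show (['m','a'] : List Char) ++ r = 'm'::'a'::r from rfl] at hr
              cases hr
              have hwr : ∀ c ∈ r, PySem.Chars.isspace c = false := fun c hc => hws c (by simp [hc])
              have hlr : r.length ≤ n := by simp at hl; omega
              have hR : pvOk ('m'::'a'::r) [] = ((!((['m','a'] : List Char).isPrefixOf r)) && pvOk r []) := by
                rw [show pvOk ('m'::'a'::r) [] = pvOk r ['m','a'] from by
                  simp [pvOk, PySem.Chars.startswith, List.isPrefixOf]]
                exact prev_ok _ (Or.inr (Or.inr (Or.inr rfl))) r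
              by_cases hYAr : (['y','a'] : List Char).isPrefixOf r = true
              · -- the first "ma" merges with a following "ya…": both sides reject
                obtain ⟨r2, hr2⟩ := (List.isPrefixOf_iff_prefix).mp hYAr
                rw [show (['y','a'] : List Char) ++ r2 = 'y'::'a'::r2 from rfl] at hr2
                cases hr2
                have hOkr : pvOk ('y'::'a'::r2) [] = false := by
                  simp [pvOk, PySem.Chars.startswith, List.isPrefixOf]
                have hg1 : g1 ('m'::'a'::'y'::'a'::r2) = 'm'::' '::g1 r2 := by
                  show rep1 pvA _ = _
                  rw [rep1_cons_ne 'a' ['y','a'] 'm' _ (by decide),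
                      rep1_cons_pos pvA 'a' ('y'::'a'::r2) (by simp [List.isPrefixOf])]
                  simp
                have hg2 : g2 ('m'::'a'::'y'::'a'::r2) = 'm'::' '::g2 r2 := by
                  show rep1 pvY (g1 _) = _
                  rw [hg1, rep1_cons_ne 'y' ['e'] 'm' _ (by decide), rep1_cons_ne 'y' ['e'] ' ' _ (by decide)]
                have hg3 : g3 ('m'::'a'::'y'::'a'::r2) = 'm'::' '::g3 r2 := by
                  show rep1 pvW (g2 _) = _
                  rw [hg2, rep1_cons_ne 'w' ['o','o'] 'm' _ (by decide), rep1_cons_ne 'w' ['o','o'] ' ' _ (by decide)]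
                have hg4 : g4 ('m'::'a'::'y'::'a'::r2) = 'm'::' '::g4 r2 := by
                  show rep1 pvM (g3 _) = _
                  rw [hg3, rep1_cons_neg pvM 'm' (' '::g3 r2) (by simp [List.isPrefixOf]),
                      rep1_cons_ne 'm' ['a'] ' ' _ (by decide)]
                rw [hR, hOkr]
                simp [pvValid, hg4, strip_cons_ne 'm' _ (by decide)]
              · rw [Bool.not_eq_true] at hYAr
                have hpfxA : pvA.isPrefixOf ('a'::r) = false := by
                  rw [show pvA.isPrefixOf ('a'::r) = (['y','a'] : List Char).isPrefixOf r from by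
                    simp [List.isPrefixOf]]
                  exact hYAr
                have hg1 : g1 ('m'::'a'::r) = 'm'::'a'::g1 r := by
                  show rep1 pvA _ = _
                  rw [rep1_cons_ne 'a' ['y','a'] 'm' _ (by decide), rep1_cons_neg pvA 'a' r hpfxA]
                have hg2 : g2 ('m'::'a'::r) = 'm'::'a'::g2 r := by
                  show rep1 pvY (g1 _) = _
                  rw [hg1, rep1_cons_ne 'y' ['e'] 'm' _ (by decide), rep1_cons_ne 'y' ['e'] 'a' _ (by decide)]
                have hg3 : g3 ('m'::'a'::r) = 'm'::'a'::g3 r := by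
                  show rep1 pvW (g2 _) = _
                  rw [hg2, rep1_cons_ne 'w' ['o','o'] 'm' _ (by decide), rep1_cons_ne 'w' ['o','o'] 'a' _ (by decide)]
                by_cases hMr : (['m','a'] : List Char).isPrefixOf r = true
                · -- r itself starts with "ma": "mama" occurs, or deeper merge; both sides reject
                  rw [hR, hMr]
                  obtain ⟨r2, hr2⟩ := (List.isPrefixOf_iff_prefix).mp hMr
                  rw [show (['m','a'] : List Char) ++ r2 = 'm'::'a'::r2 from rfl] at hr2
                  cases hr2
                  by_cases hYA2 : (['y','a'] : List Char).isPrefixOf r2 = true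
                  · -- s = "mama" ++ "ya…": a leftover 'm' survives all replacements
                    obtain ⟨r3, hr3⟩ := (List.isPrefixOf_iff_prefix).mp hYA2
                    rw [show (['y','a'] : List Char) ++ r3 = 'y'::'a'::r3 from rfl] at hr3
                    cases hr3
                    have hh1 : g1 ('m'::'a'::'m'::'a'::'y'::'a'::r3) = 'm'::'a'::'m'::' '::g1 r3 := by
                      show rep1 pvA _ = _
                      rw [rep1_cons_ne 'a' ['y','a'] 'm' _ (by decide),
                          rep1_cons_neg pvA 'a' ('m'::'a'::'y'::'a'::r3) (by simp [List.isPrefixOf]),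
                          rep1_cons_ne 'a' ['y','a'] 'm' _ (by decide),
                          rep1_cons_pos pvA 'a' ('y'::'a'::r3) (by simp [List.isPrefixOf])]
                      simp
                    have hh2 : g2 ('m'::'a'::'m'::'a'::'y'::'a'::r3) = 'm'::'a'::'m'::' '::g2 r3 := by
                      show rep1 pvY (g1 _) = _
                      rw [hh1, rep1_cons_ne 'y' ['e'] 'm' _ (by decide), rep1_cons_ne 'y' ['e'] 'a' _ (by decide),
                          rep1_cons_ne 'y' ['e'] 'm' _ (by decide), rep1_cons_ne 'y' ['e'] ' ' _ (by decide)]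
                    have hh3 : g3 ('m'::'a'::'m'::'a'::'y'::'a'::r3) = 'm'::'a'::'m'::' '::g3 r3 := by
                      show rep1 pvW (g2 _) = _
                      rw [hh2, rep1_cons_ne 'w' ['o','o'] 'm' _ (by decide), rep1_cons_ne 'w' ['o','o'] 'a' _ (by decide),
                          rep1_cons_ne 'w' ['o','o'] 'm' _ (by decide), rep1_cons_ne 'w' ['o','o'] ' ' _ (by decide)]
                    have hh4 : g4 ('m'::'a'::'m'::'a'::'y'::'a'::r3) = ' '::'m'::' '::g4 r3 := by
                      show rep1 pvM (g3 _) = _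
                      rw [hh3, rep1_cons_pos pvM 'm' ('a'::'m'::' '::g3 r3) (by simp [List.isPrefixOf])]
                      simp only [show (['m','a'] : List Char).length - 1 = 1 from rfl, List.drop_one, List.tail_cons]
                      rw [rep1_cons_neg pvM 'm' (' '::g3 r3) (by simp [List.isPrefixOf]),
                          rep1_cons_ne 'm' ['a'] ' ' _ (by decide)]
                    simp [pvValid, hh4, strip_cons_space, strip_cons_ne 'm' _ (by decide)]
                  · -- "mama" occurs at the head of g3 s
                    rw [Bool.not_eq_true] at hYA2
                    have hg1r : g1 ('m'::'a'::r2) = 'm'::'a'::g1 r2 := by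
                      show rep1 pvA _ = _
                      rw [rep1_cons_ne 'a' ['y','a'] 'm' _ (by decide),
                          rep1_cons_neg pvA 'a' r2 (by
                            rw [show pvA.isPrefixOf ('a'::r2) = (['y','a'] : List Char).isPrefixOf r2 from by
                              simp [List.isPrefixOf]]
                            exact hYA2)]
                    have hg2r : g2 ('m'::'a'::r2) = 'm'::'a'::g2 r2 := by
                      show rep1 pvY (g1 _) = _
                      rw [hg1r, rep1_cons_ne 'y' ['e'] 'm' _ (by decide), rep1_cons_ne 'y' ['e'] 'a' _ (by decide)]
                    have hg3r : g3 ('m'::'a'::r2) = 'm'::'a'::g3 r2 := by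
                      show rep1 pvW (g2 _) = _
                      rw [hg2r, rep1_cons_ne 'w' ['o','o'] 'm' _ (by decide), rep1_cons_ne 'w' ['o','o'] 'a' _ (by decide)]
                    have hd : PySem.Chars.isIn ['m','a','m','a'] (g3 ('m'::'a'::('m'::'a'::r2))) = true := by
                      rw [hg3, in_cons]
                      have : (['m','a','m','a'] : List Char).isPrefixOf ('m'::'a'::g3 ('m'::'a'::r2)) = true := by
                        rw [hg3r]
                        simp [List.isPrefixOf]
                      simp [this]
                    simp [pvValid, hd]
                · -- clean case: strip one "ma" token off both programs
                  rw [Bool.not_eq_true] at hMr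
                  have d1e : PySem.Chars.isIn ['a','y','a','a','y','a'] ('m'::'a'::r)
                           = PySem.Chars.isIn ['a','y','a','a','y','a'] r := by
                    rw [in_cons_ne 'a' _ 'm' _ (by decide), in_cons]
                    rw [show (['a','y','a','a','y','a'] : List Char).isPrefixOf ('a'::r)
                          = (['y','a','a','y','a'] : List Char).isPrefixOf r from by simp [List.isPrefixOf]]
                    rw [pfx_longer r hYAr]
                    simp
                  have d2e : PySem.Chars.isIn ['y','e','y','e'] (g1 ('m'::'a'::r))
                           = PySem.Chars.isIn ['y','e','y','e'] (g1 r) := by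
                    rw [hg1, in_cons_ne 'y' _ 'm' _ (by decide), in_cons_ne 'y' _ 'a' _ (by decide)]
                  have d3e : PySem.Chars.isIn ['w','o','o','w','o','o'] (g2 ('m'::'a'::r))
                           = PySem.Chars.isIn ['w','o','o','w','o','o'] (g2 r) := by
                    rw [hg2, in_cons_ne 'w' _ 'm' _ (by decide), in_cons_ne 'w' _ 'a' _ (by decide)]
                  have hMg : (['m','a'] : List Char).isPrefixOf (g3 r) = false := by
                    cases hv : (['m','a'] : List Char).isPrefixOf (g3 r) with
                    | false => rfl
                    | true => exact absurd (T4 r hv) (by simp [hMr])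
                  have d4e : PySem.Chars.isIn ['m','a','m','a'] (g3 ('m'::'a'::r))
                           = PySem.Chars.isIn ['m','a','m','a'] (g3 r) := by
                    rw [hg3, in_cons, in_cons_ne 'm' _ 'a' _ (by decide)]
                    rw [show (['m','a','m','a'] : List Char).isPrefixOf ('m'::'a'::g3 r)
                          = (['m','a'] : List Char).isPrefixOf (g3 r) from by simp [List.isPrefixOf]]
                    rw [hMg]
                    simp
                  have hg4 : g4 ('m'::'a'::r) = ' ' :: g4 r := by
                    show rep1 pvM (g3 _) = _
                    rw [hg3, rep1_cons_pos pvM 'm' ('a'::g3 r) (by simp [List.isPrefixOf])]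
                    simp
                  have hv : pvValid ('m'::'a'::r) = pvValid r := by
                    simp only [pvValid, d1e, d2e, d3e, d4e, hg4, strip_cons_space]
                  rw [hv, ih r hlr hwr, hR, hMr]
                  simp
            · -- no word is a prefix of s : both sides are false
              rw [Bool.not_eq_true] at e1 e2 e3 e4
              have hRf : pvOk (c :: t) [] = false := by
                simp [pvOk, PySem.Chars.startswith, e1, e2, e3, e4]
              have hg1 : g1 (c :: t) = c :: g1 t := rep1_cons_neg _ _ _ e1
              have hpf2 : pvY.isPrefixOf (c :: g1 t) = false := by
                have := EQ2 (c :: t)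
                rw [show g1 (c :: t) = c :: g1 t from hg1] at this
                rw [this]; exact e2
              have hg2 : g2 (c :: t) = c :: g2 t := by
                show rep1 pvY (g1 (c :: t)) = _
                rw [hg1]; exact rep1_cons_neg _ _ _ hpf2
              have hpf3 : pvW.isPrefixOf (c :: g2 t) = false := by
                have := EQ3 (c :: t)
                rw [show g2 (c :: t) = c :: g2 t from hg2] at this
                rw [this]; exact e3
              have hg3 : g3 (c :: t) = c :: g3 t := by
                show rep1 pvW (g2 (c :: t)) = _
                rw [hg2]; exact rep1_cons_neg _ _ _ hpf3
              have hpf4 : pvM.isPrefixOf (c :: g3 t) = false := by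
                rw [← hg3]
                cases hv : pvM.isPrefixOf (g3 (c :: t)) with
                | false => rfl
                | true => exact absurd (T4 _ hv) (by simp [e4])
              have hg4 : g4 (c :: t) = c :: g4 t := by
                show rep1 pvM (g3 (c :: t)) = _
                rw [hg3]; exact rep1_cons_neg _ _ _ hpf4
              have hcs : PySem.Chars.isspace c = false := hws c (by simp)
              rw [hRf]
              simp [pvValid, hg4, strip_cons_ne c _ hcs]

theorem pfx_decomp (p : List Char) (c : Char) (t : List Char)
    (h : p.isPrefixOf (c :: t) = true) (hp : p ≠ []) :
    c :: t = p ++ t.drop (p.length - 1) := by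
  obtain ⟨u, hu⟩ := (List.isPrefixOf_iff_prefix).mp h
  cases p with
  | nil => exact absurd rfl hp
  | cons a p' =>
    have h1 : a = c := by
      have := hu
      simp only [List.cons_append, List.cons.injEq] at this
      exact this.1
    have h2 : t = p' ++ u := by
      have := hu
      simp only [List.cons_append, List.cons.injEq] at this
      exact this.2.symm
    subst h1
    rw [h2]
    simp

theorem mem_rep1 (p : List Char) (hp : p ≠ []) :
    ∀ (n : Nat) (x : List Char) (c0 : Char), x.length ≤ n → c0 ∈ x → c0 ∉ p → c0 ∈ rep1 p x := by
  intro n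
  induction n with
  | zero =>
    intro x c0 hl hc _
    have : x = [] := by cases x <;> simp_all
    subst this; simp at hc
  | succ n ihn =>
    intro x c0 hl hc hcp
    cases x with
    | nil => simp at hc
    | cons c t =>
      by_cases h : p.isPrefixOf (c :: t) = true
      · rw [rep1_cons_pos _ _ _ h]
        have hdec := pfx_decomp p c t h hp
        have hcu : c0 ∈ p ++ t.drop (p.length - 1) := hdec ▸ hc
        rcases List.mem_append.mp hcu with hin | hin
        · exact absurd hin hcp
        · have hlen : (t.drop (p.length - 1)).length ≤ n := by
            simp at hl ⊢; omega
          exact List.mem_cons_of_mem _ (ihn _ _ hlen hin hcp)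
      · rw [rep1_cons_neg _ _ _ (by rw [Bool.eq_false_iff]; exact h)]
        rcases List.mem_cons.mp hc with rfl | hin
        · exact List.mem_cons_self
        · have hlen : t.length ≤ n := by simp at hl; omega
          exact List.mem_cons_of_mem _ (ihn _ _ hlen hin hcp)

theorem mem_rep1_rev (p : List Char) (_hp : p ≠ []) :
    ∀ (n : Nat) (x : List Char) (c : Char), x.length ≤ n → c ∈ rep1 p x → c ∈ x ∨ c = ' ' := by
  intro n
  induction n with
  | zero =>
    intro x c hl hm
    have : x = [] := by cases x <;> simp_all
    subst this; rw [rep1_nil] at hm; simp at hm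
  | succ n ihn =>
    intro x c hl hm
    cases x with
    | nil => rw [rep1_nil] at hm; simp at hm
    | cons a t =>
      by_cases h : p.isPrefixOf (a :: t) = true
      · rw [rep1_cons_pos _ _ _ h] at hm
        rcases List.mem_cons.mp hm with rfl | hin
        · right; rfl
        · rcases ihn _ c (by simp at hl ⊢; omega) hin with hx | hsp
          · left
            exact List.mem_cons_of_mem _ ((List.drop_sublist _ _).mem hx)
          · right; exact hsp
      · rw [rep1_cons_neg _ _ _ (by rw [Bool.eq_false_iff]; exact h)] at hm
        rcases List.mem_cons.mp hm with rfl | hin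
        · left; exact List.mem_cons_self
        · rcases ihn _ c (by simp at hl; omega) hin with hx | hsp
          · left; exact List.mem_cons_of_mem _ hx
          · right; exact hsp

theorem rep1_id (p : List Char) :
    ∀ (n : Nat) (x : List Char), x.length ≤ n → (∃ ch ∈ p, ch ∉ x) → rep1 p x = x := by
  intro n
  induction n with
  | zero =>
    intro x hl _
    have : x = [] := by cases x <;> simp_all
    subst this; exact rep1_nil p
  | succ n ihn =>
    intro x hl hch
    obtain ⟨ch, hchp, hchx⟩ := hch
    cases x with
    | nil => exact rep1_nil p
    | cons a t =>
      have hnp : p.isPrefixOf (a :: t) = false := by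
        cases hv : p.isPrefixOf (a :: t) with
        | false => rfl
        | true =>
          exact absurd (((List.isPrefixOf_iff_prefix).mp hv).sublist.mem hchp) hchx
      rw [rep1_cons_neg _ _ _ hnp]
      rw [ihn t (by simp at hl; omega) ⟨ch, hchp, fun hm => hchx (List.mem_cons_of_mem _ hm)⟩]

-- a non-whitespace character that no word can cover (each word containing it needs a
-- character the fragment lacks) survives A's whole pipeline: A rejects the fragment
theorem pvBadA (s : List Char) (c0 : Char) (hc : c0 ∈ s)
    (hs : PySem.Chars.isspace c0 = false)
    (hblk : ∀ w ∈ pvWordsPre, c0 ∈ w → ∃ ch ∈ w, ch ∉ s) :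
    pvValid s = false := by
  have hwA := hblk ['a','y','a'] (by simp [pvWordsPre])
  have hwY := hblk ['y','e'] (by simp [pvWordsPre])
  have hwW := hblk ['w','o','o'] (by simp [pvWordsPre])
  have hwM := hblk ['m','a'] (by simp [pvWordsPre])
  have nsp : ∀ x : List Char, ∀ ch, ch ∉ x → ch ≠ ' ' → ch ∉ rep1 ['a','y','a'] x := by
    intro x ch h hne hm
    rcases mem_rep1_rev _ (by decide) x.length x ch le_rfl hm with h' | h'
    exacts [h h', hne h']
  have nspY : ∀ x : List Char, ∀ ch, ch ∉ x → ch ≠ ' ' → ch ∉ rep1 ['y','e'] x := by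
    intro x ch h hne hm
    rcases mem_rep1_rev _ (by decide) x.length x ch le_rfl hm with h' | h'
    exacts [h h', hne h']
  have m1 : c0 ∈ g1 s := by
    by_cases hmem : c0 ∈ (['a','y','a'] : List Char)
    · obtain ⟨ch, hchw, hchs⟩ := hwA hmem
      show c0 ∈ rep1 ['a','y','a'] s
      rw [rep1_id _ s.length s le_rfl ⟨ch, hchw, hchs⟩]
      exact hc
    · exact mem_rep1 _ (by decide) s.length s c0 le_rfl hc hmem
  have m2 : c0 ∈ g2 s := by
    by_cases hmem : c0 ∈ (['y','e'] : List Char)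
    · obtain ⟨ch, hchw, hchs⟩ := hwY hmem
      have hchne : ch ≠ ' ' := by
        simp at hchw; rcases hchw with rfl | rfl <;> decide
      show c0 ∈ rep1 ['y','e'] (g1 s)
      rw [rep1_id _ (g1 s).length (g1 s) le_rfl ⟨ch, hchw, nsp s ch hchs hchne⟩]
      exact m1
    · exact mem_rep1 _ (by decide) (g1 s).length (g1 s) c0 le_rfl m1 hmem
  have m3 : c0 ∈ g3 s := by
    by_cases hmem : c0 ∈ (['w','o','o'] : List Char)
    · obtain ⟨ch, hchw, hchs⟩ := hwW hmem
      have hchne : ch ≠ ' ' := by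
        simp at hchw; rcases hchw with rfl | rfl | rfl <;> decide
      show c0 ∈ rep1 ['w','o','o'] (g2 s)
      rw [rep1_id _ (g2 s).length (g2 s) le_rfl
        ⟨ch, hchw, nspY (g1 s) ch (nsp s ch hchs hchne) hchne⟩]
      exact m2
    · exact mem_rep1 _ (by decide) (g2 s).length (g2 s) c0 le_rfl m2 hmem
  have m4 : c0 ∈ g4 s := by
    by_cases hmem : c0 ∈ (['m','a'] : List Char)
    · obtain ⟨ch, hchw, hchs⟩ := hwM hmem
      have hchne : ch ≠ ' ' := by
        simp at hchw; rcases hchw with rfl | rfl <;> decide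
      have hch3 : ch ∉ g3 s := by
        intro hm
        rcases mem_rep1_rev _ (by decide) (g2 s).length (g2 s) ch le_rfl hm with h' | h'
        · exact nspY (g1 s) ch (nsp s ch hchs hchne) hchne h'
        · exact hchne h'
      show c0 ∈ rep1 ['m','a'] (g3 s)
      rw [rep1_id _ (g3 s).length (g3 s) le_rfl ⟨ch, hchw, hch3⟩]
      exact m3
    · exact mem_rep1 _ (by decide) (g3 s).length (g3 s) c0 le_rfl m3 hmem
  have hst : ¬ (PySem.Chars.strip (g4 s) = []) := by
    intro h
    have := (strip_eq_nil_iff _).mp h c0 m4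
    rw [hs] at this
    exact absurd this (by simp)
  simp [pvValid, hst]

-- B's tokenizer also rejects such a fragment: every parse step would have to cover c0
-- by a whole word, whose characters all lie in the fragment
theorem pvBadB : ∀ (n : Nat) (s prev : List Char) (c0 : Char), s.length ≤ n →
    c0 ∈ s → (∀ w ∈ pvWordsPre, c0 ∈ w → ∃ ch ∈ w, ch ∉ s) → pvOk s prev = false := by
  intro n
  induction n with
  | zero =>
    intro s prev c0 hl hc _
    have : s = [] := by cases s <;> simp_all
    subst this; simp at hc
  | succ n ihn =>
    intro s prev c0 hl hc hblk
    cases s with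
    | nil => simp at hc
    | cons c t =>
      have step : ∀ (w : List Char), w ∈ pvWordsPre → w.isPrefixOf (c :: t) = true →
          c0 ∈ w ++ t.drop (w.length - 1) → pvOk (t.drop (w.length - 1)) w = false := by
        intro w hwmem hpfx hcu
        rcases List.mem_append.mp hcu with hin | hin
        · obtain ⟨ch, hchw, hchs⟩ := hblk w hwmem hin
          exact absurd (((List.isPrefixOf_iff_prefix).mp hpfx).sublist.mem hchw) hchs
        · refine ihn _ w c0 (by simp at hl ⊢; omega) hin ?_
          intro w' hw' hcw'
          obtain ⟨ch, hchw, hchs⟩ := hblk w' hw' hcw'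
          exact ⟨ch, hchw, fun hm =>
            hchs (List.mem_cons_of_mem _ ((List.drop_sublist _ _).mem hm))⟩
      simp only [pvOk, PySem.Chars.startswith]
      by_cases e1 : (['a','y','a'] : List Char).isPrefixOf (c :: t) = true
      · rw [if_pos e1]
        have hst : pvOk (List.drop 2 t) ['a','y','a'] = false :=
          step ['a','y','a'] (by simp [pvWordsPre]) e1 ((pfx_decomp _ c t e1 (by decide)) ▸ hc)
        rw [hst]; simp
      · rw [if_neg e1]
        by_cases e2 : (['y','e'] : List Char).isPrefixOf (c :: t) = true
        · rw [if_pos e2]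
          have hst : pvOk (List.drop 1 t) ['y','e'] = false :=
            step ['y','e'] (by simp [pvWordsPre]) e2 ((pfx_decomp _ c t e2 (by decide)) ▸ hc)
          rw [hst]; simp
        · rw [if_neg e2]
          by_cases e3 : (['w','o','o'] : List Char).isPrefixOf (c :: t) = true
          · rw [if_pos e3]
            have hst : pvOk (List.drop 2 t) ['w','o','o'] = false :=
              step ['w','o','o'] (by simp [pvWordsPre]) e3 ((pfx_decomp _ c t e3 (by decide)) ▸ hc)
            rw [hst]; simp
          · rw [if_neg e3]
            by_cases e4 : (['m','a'] : List Char).isPrefixOf (c :: t) = true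
            · rw [if_pos e4]
              have hst : pvOk (List.drop 1 t) ['m','a'] = false :=
                step ['m','a'] (by simp [pvWordsPre]) e4 ((pfx_decomp _ c t e4 (by decide)) ▸ hc)
              rw [hst]; simp
            · rw [if_neg e4]

theorem loopA_eq (s : List Char) :
    (match pvLoopA pvWordsA s with
     | none => false
     | some temp => decide (PySem.Chars.strip temp = [])) = pvValid s := by
  have p1 : PySem.List.pyRepeat (['a','y','a'] : List Char) 2 = ['a','y','a','a','y','a'] := by decide
  have p2 : PySem.List.pyRepeat (['y','e'] : List Char) 2 = ['y','e','y','e'] := by decide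
  have p3 : PySem.List.pyRepeat (['w','o','o'] : List Char) 2 = ['w','o','o','w','o','o'] := by decide
  have p4 : PySem.List.pyRepeat (['m','a'] : List Char) 2 = ['m','a','m','a'] := by decide
  have r1 : PySem.Chars.replace s ['a','y','a'] [' '] = g1 s := replace_eq_rep1 s _ (by decide)
  have r2 : PySem.Chars.replace (g1 s) ['y','e'] [' '] = g2 s := replace_eq_rep1 _ _ (by decide)
  have r3 : PySem.Chars.replace (g2 s) ['w','o','o'] [' '] = g3 s := replace_eq_rep1 _ _ (by decide)
  have r4 : PySem.Chars.replace (g3 s) ['m','a'] [' '] = g4 s := replace_eq_rep1 _ _ (by decide)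
  simp only [pvWordsA, pvLoopA, p1, r1, p2, r2, p3, r3, p4, r4, pvValid]
  split_ifs with h1 h2 h3 h4 <;> simp [*]

theorem fold_eq (l : List String)
    (h : ∀ b ∈ l, (∀ c ∈ b.toList, PySem.Chars.isspace c = false) ∨
         (∃ c0 ∈ b.toList, PySem.Chars.isspace c0 = false ∧
            ∀ w ∈ pvWordsPre, c0 ∈ w → ∃ ch ∈ w, ch ∉ b.toList)) :
    ∀ acc : Int,
      l.foldl (fun answer b =>
        match pvLoopA pvWordsA b.toList with
        | none => answer
        | some temp => if PySem.Chars.strip temp = [] then answer + 1 else answer) acc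
      = l.foldl (fun acc b => acc + (if pvOk b.toList [] then 1 else 0)) acc := by
  induction l with
  | nil => intro acc; rfl
  | cons b l ihl =>
    intro acc
    have hv : pvValid b.toList = pvOk b.toList [] := by
      rcases h b List.mem_cons_self with hb | ⟨c0, hc0, hsp, hblk⟩
      · exact pvMain b.toList.length _ le_rfl hb
      · rw [pvBadA b.toList c0 hc0 hsp hblk, pvBadB b.toList.length _ [] c0 le_rfl hc0 hblk]
    have he := loopA_eq b.toList
    simp only [List.foldl_cons]
    rw [show (match pvLoopA pvWordsA b.toList with
        | none => acc
        | some temp => if PySem.Chars.strip temp = [] then acc + 1 else acc)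
      = acc + (if pvOk b.toList [] then 1 else 0) from ?_]
    · exact ihl (fun b hb => h b (List.mem_cons_of_mem _ hb)) _
    · rw [← hv, ← he]
      cases hm : pvLoopA pvWordsA b.toList with
      | none => simp
      | some temp =>
        by_cases hs : PySem.Chars.strip temp = []
        · simp [hs]
        · simp [hs]

-- ===== VERDICT (by name: the statement is the Claim_ definition above) =====
theorem solution_spec : Claim_equal_solution := by
  intro babbling _ hpre
  show solution babbling = solution_alt babbling
  unfold solution solution_alt
  refine fold_eq babbling ?_ 0
  intro b hb
  have := List.all_eq_true.mp hpre b hb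
  rcases Bool.or_eq_true_iff.mp this with hall | hany
  · left
    intro c hc
    simpa using List.all_eq_true.mp hall c hc
  · right
    obtain ⟨c0, hc0, hp⟩ := List.any_eq_true.mp hany
    rw [Bool.and_eq_true] at hp
    refine ⟨c0, hc0, by simpa using hp.1, ?_⟩
    intro w hw hcw
    have := List.all_eq_true.mp hp.2 w hw
    rcases Bool.or_eq_true_iff.mp this with hnc | hex
    · exact absurd hcw (by simpa using hnc)
    · obtain ⟨ch, hch, hnb⟩ := List.any_eq_true.mp hex
      exact ⟨ch, hch, by simpa using hnb⟩
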